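-- pv_equiv track=rewrite | github.com/K4krasin/Python2022_CODEME | 05_funkctions/D&D History.py | select_role_by_age
-- ===== SOURCE A (Python) =====
-- def select_role_by_age(age):
--     if age < 16:
--         return ("Twoja postać jest jeszcze niedojrzała na przygody. Cieszy się dzieciństwem i zbiera truskawki u babci na działce.")
--     elif age < 25:
--         age = 'Młodzieniec'
--         return age
--     elif age < 40:
--         age = 'W sile wieku'
--         return age
--     elif age < 65:
--         age = 'Doświadczony'
--         return age
--     else:
--         return ("Jeszcze żyjesz? Ciesz się tą chwilą póki możesz i siedź w domu.")
--
--     return select_role_by_age(age)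
-- ===== SOURCE B (Python) =====
-- MESSAGES = [
--     "Twoja postać jest jeszcze niedojrzała na przygody. Cieszy się dzieciństwem i zbiera truskawki u babci na działce.",
--     'Młodzieniec',
--     'W sile wieku',
--     'Doświadczony',
--     "Jeszcze żyjesz? Ciesz się tą chwilą póki możesz i siedź w domu.",
-- ]
--
-- def select_role_by_age(age):
--     # branch-free bucketing: the number of thresholds already reached IS the index
--     return MESSAGES[sum(age >= t for t in (16, 25, 40, 65))]
-- ===== Notes on version B (the rewrite author's own statement) =====
-- stated objective: alternative
-- what changed: Replaces the five-branch if/elif chain by branch-free bucketing: count how many of the thresholds (16,25,40,65) the age has reached and use that count directly as an index into the message list.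
import Mathlib
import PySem

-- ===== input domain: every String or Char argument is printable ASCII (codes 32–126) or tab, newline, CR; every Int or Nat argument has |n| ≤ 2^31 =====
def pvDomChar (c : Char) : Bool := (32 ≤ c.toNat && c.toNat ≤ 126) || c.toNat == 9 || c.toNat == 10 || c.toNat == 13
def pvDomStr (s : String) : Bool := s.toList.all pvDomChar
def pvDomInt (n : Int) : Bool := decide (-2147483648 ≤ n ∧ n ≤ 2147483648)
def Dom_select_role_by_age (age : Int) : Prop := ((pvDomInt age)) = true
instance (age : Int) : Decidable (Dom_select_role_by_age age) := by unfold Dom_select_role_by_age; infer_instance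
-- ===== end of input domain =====

-- B replaces the if/elif chain by branch-free bucketing: the count of thresholds reached is the index into a message list (objective: alternative).

-- ===== PORT A =====
def select_role_by_age (age : Int) : String :=
  if age < 16 then
    "Twoja postać jest jeszcze niedojrzała na przygody. Cieszy się dzieciństwem i zbiera truskawki u babci na działce."
  else if age < 25 then
    "Młodzieniec"
  else if age < 40 then
    "W sile wieku"
  else if age < 65 then
    "Doświadczony"
  else
    "Jeszcze żyjesz? Ciesz się tą chwilą póki możesz i siedź w domu."

-- ===== PORT B =====
def MESSAGES : List String :=
  ["Twoja postać jest jeszcze niedojrzała na przygody. Cieszy się dzieciństwem i zbiera truskawki u babci na działce.",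
   "Młodzieniec",
   "W sile wieku",
   "Doświadczony",
   "Jeszcze żyjesz? Ciesz się tą chwilą póki możesz i siedź w domu."]

-- sum(age >= t for t in (16, 25, 40, 65)); MESSAGES[idx] via PySem.List.pyGet? (idx always in range, so getD "" never fires)
def select_role_by_age_alt (age : Int) : String :=
  let idx : Int := [(16 : Int), 25, 40, 65].foldl (fun acc t => acc + (if age ≥ t then 1 else 0)) 0
  (PySem.List.pyGet? MESSAGES idx).getD ""

-- ===== PRECONDITION & SPEC =====
def Spec_select_role_by_age (age : Int) (out : String) : Prop := out = select_role_by_age_alt age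
instance (age : Int) (out : String) : Decidable (Spec_select_role_by_age age out) := by unfold Spec_select_role_by_age; infer_instance

-- ===== CLAIM =====
def Claim_equal_select_role_by_age : Prop := ∀ (age : Int), Dom_select_role_by_age age → Spec_select_role_by_age age (select_role_by_age age)

-- ===== LEMMAS AND PROOFS =====

-- ===== VERDICT =====
theorem select_role_by_age_spec : Claim_equal_select_role_by_age := by
  intro age _
  unfold Spec_select_role_by_age select_role_by_age select_role_by_age_alt MESSAGES
  by_cases h1 : age < 16
  · simp [List.foldl, h1, show ¬(age ≥ 16) by omega, show ¬(age ≥ 25) by omega,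
      show ¬(age ≥ 40) by omega, show ¬(age ≥ 65) by omega, PySem.List.pyGet?, PySem.List.pyIdx?]
  · by_cases h2 : age < 25
    · simp [List.foldl, h1, h2, show age ≥ 16 by omega, show ¬(age ≥ 25) by omega,
        show ¬(age ≥ 40) by omega, show ¬(age ≥ 65) by omega, PySem.List.pyGet?, PySem.List.pyIdx?]
    · by_cases h3 : age < 40
      · simp [List.foldl, h1, h2, h3, show age ≥ 16 by omega, show age ≥ 25 by omega,
          show ¬(age ≥ 40) by omega, show ¬(age ≥ 65) by omega, PySem.List.pyGet?, PySem.List.pyIdx?]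
      · by_cases h4 : age < 65
        · simp [List.foldl, h1, h2, h3, h4, show age ≥ 16 by omega, show age ≥ 25 by omega,
            show age ≥ 40 by omega, show ¬(age ≥ 65) by omega, PySem.List.pyGet?, PySem.List.pyIdx?]
        · simp [List.foldl, h1, h2, h3, h4, show age ≥ 16 by omega, show age ≥ 25 by omega,
            show age ≥ 40 by omega, show age ≥ 65 by omega, PySem.List.pyGet?, PySem.List.pyIdx?]
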